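-- pv_equiv track=rewrite | github.com/raghavendramorisetty/Python-Programs-Files | Programs/Practice/dict4.py | find_max_pair_count
-- ===== SOURCE A (Python) =====
-- def find_max_pair_count(lst):
--     from collections import defaultdict
--
--     N = len(lst)
--     sum_counts = defaultdict(int)
--     pair_counts = []
--
--     # Collect all pair sums and their counts
--     for i in range(N):
--         for j in range(i + 1, N):
--             pair_sum = lst[i] + lst[j]
--             sum_counts[pair_sum] += 1
--
--     # Iterate over unique sums and calculate maximum pair counts
--     for target_sum in sum_counts:
--         count = 0
--         used = [False] * N
--
--         # Find pairs for the current target sum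
--         for i in range(N):
--             if used[i]:
--                 continue
--             for j in range(i + 1, N):
--                 if used[j]:
--                     continue
--                 if lst[i] + lst[j] == target_sum:
--                     count += 1
--                     used[i] = True
--                     used[j] = True
--                     break
--
--         pair_counts.append(count)
--
--     return max(pair_counts)
-- ===== SOURCE B (Python) =====
-- def find_max_pair_count(lst):
--     from collections import Counter
--     cnt = Counter(lst)
--     sums = {v + w for v in cnt for w in cnt if v != w or cnt[v] > 1}
--     return max(
--         sum(min(cnt[u], cnt[s - u]) if u < s - u else (cnt[u] // 2 if u == s - u else 0)
--             for u in cnt)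
--         for s in sums)
-- ===== Notes on version B (the rewrite author's own statement) =====
-- stated objective: faster
-- what changed: A rebuilds an O(N^2) greedy disjoint-pair matching (with a used-array and inner rescans) for every one of the O(N^2) pair sums; B builds a value-frequency Counter once and, for each candidate sum S over distinct value pairs, counts pairs by the closed formula sum of min(cnt[v],cnt[S-v]) over v < S-v plus cnt[S/2]//2, which equals the greedy count because a maximal matching on a disjoint union of complete bipartite graphs/cliques is maximum.
import Mathlib
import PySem

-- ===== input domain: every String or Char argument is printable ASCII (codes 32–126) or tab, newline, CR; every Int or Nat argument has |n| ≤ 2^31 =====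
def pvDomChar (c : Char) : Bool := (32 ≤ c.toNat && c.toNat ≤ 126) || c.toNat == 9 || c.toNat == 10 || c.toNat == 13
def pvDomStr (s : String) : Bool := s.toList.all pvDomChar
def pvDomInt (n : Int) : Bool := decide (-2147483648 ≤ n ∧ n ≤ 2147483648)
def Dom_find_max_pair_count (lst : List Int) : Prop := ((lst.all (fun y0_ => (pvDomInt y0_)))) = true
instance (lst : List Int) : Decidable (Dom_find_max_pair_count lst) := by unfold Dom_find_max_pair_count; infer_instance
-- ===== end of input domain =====

-- B replaces A's quadratic greedy matching per candidate sum (inside a scan over all O(N^2) pair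
-- sums) by a value-frequency Counter and the closed formula min(cnt v, cnt (S-v)) / cnt(S/2)//2
-- per sum; equal because a greedy maximal matching on a disjoint union of complete bipartite
-- graphs / cliques is maximum.

-- ===== PORT A =====
-- first nested loop of A: defaultdict(int) of pair-sum multiplicities (only its keys are used later)
def pvSumCounts (lst : List Int) : PySem.Dict Int Int :=
  (PySem.List.pyRange 0 (lst.length : Int) 1).foldl (fun d i =>
    (PySem.List.pyRange (i + 1) (lst.length : Int) 1).foldl (fun d j =>
      d.modify (PySem.List.pyGetD lst i 0 + PySem.List.pyGetD lst j 0) 0 (· + 1)) d)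
    PySem.Dict.empty

-- the inner `for j ... break` loop: first j with not used[j] and lst[i]+lst[j] == target_sum.
-- indices come from range(...), hence are nonnegative, so `.toNat` is exact here.
def pvFindJ (lst : List Int) (S : Int) (used : List Bool) (xi : Int) : List Int → Option Int
  | [] => none
  | j :: rest =>
    if used.getD j.toNat false then pvFindJ lst S used xi rest
    else if xi + PySem.List.pyGetD lst j 0 = S then some j
    else pvFindJ lst S used xi rest

-- the greedy pairing pass for one target_sum (count, used-array state)
def pvGreedy (lst : List Int) (S : Int) : Int :=
  ((PySem.List.pyRange 0 (lst.length : Int) 1).foldl (fun (st : Int × List Bool) i =>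
      if st.2.getD i.toNat false then st
      else
        match pvFindJ lst S st.2 (PySem.List.pyGetD lst i 0)
            (PySem.List.pyRange (i + 1) (lst.length : Int) 1) with
        | none => st
        | some j => (st.1 + 1, (st.2.set i.toNat true).set j.toNat true))
    (0, List.replicate lst.length false)).1

-- max(pair_counts): Python max raises on an empty list — excluded by Pre_ (len < 2), so the
-- `.getD 0` default is never the returned value on admitted inputs.
def find_max_pair_count (lst : List Int) : Int :=
  let sum_counts := pvSumCounts lst
  let pair_counts := sum_counts.keys.foldl (fun acc S => acc ++ [pvGreedy lst S]) []
  (PySem.List.max? pair_counts id).getD 0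

-- ===== PORT B =====
def pvTerm (cnt : PySem.Dict Int Int) (s u : Int) : Int :=
  if u < s - u then min (cnt.getD u 0) (cnt.getD (s - u) 0)
  else if u = s - u then PySem.Int.floordiv (cnt.getD u 0) 2
  else 0

def find_max_pair_count_alt (lst : List Int) : Int :=
  let cnt := PySem.Dict.counter lst
  let vals := cnt.keys
  let sums := vals.foldl (fun s v =>
      vals.foldl (fun s w =>
        if v != w || cnt.getD v 0 > 1 then PySem.Set.add s (v + w) else s) s)
    PySem.Set.empty
  (PySem.List.max? (sums.map (fun s => (vals.map (fun u => pvTerm cnt s u)).sum)) id).getD 0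

-- ===== PRECONDITION & SPEC =====
-- Python A raises ValueError (max() of an empty sequence) when len(lst) < 2; so does B.
def Pre_find_max_pair_count (lst : List Int) : Prop := 2 ≤ lst.length
instance (lst : List Int) : Decidable (Pre_find_max_pair_count lst) := by
  unfold Pre_find_max_pair_count; infer_instance
def pvWitness_find_max_pair_count : List Int := [1, 2, 3]

def Spec_find_max_pair_count (lst : List Int) (out : Int) : Prop := out = find_max_pair_count_alt lst
instance (lst : List Int) (out : Int) : Decidable (Spec_find_max_pair_count lst out) := by
  unfold Spec_find_max_pair_count; infer_instance

-- ===== CLAIM (what is proved, stated in full; the proofs are below) =====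
def Claim_equal_find_max_pair_count : Prop := ∀ (lst : List Int), Dom_find_max_pair_count lst →
  Pre_find_max_pair_count lst → Spec_find_max_pair_count lst (find_max_pair_count lst)

-- ===== LEMMAS AND PROOFS =====

-- the characterisation both programs' candidate-sum collections share: z is a sum of two
-- elements of lst sitting at two distinct positions
def pvValChar (lst : List Int) (z : Int) : Prop :=
  ∃ a b, a ∈ lst ∧ b ∈ lst ∧ (a = b → 2 ≤ lst.count a) ∧ z = a + b

theorem pvMem_foldl_addIf {β : Type} (l : List β) (p : β → Bool) (f : β → Int)
    (s : PySem.Set Int) (z : Int) :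
    z ∈ l.foldl (fun s e => if p e then PySem.Set.add s (f e) else s) s ↔
      z ∈ s ∨ ∃ e ∈ l, p e = true ∧ z = f e := by
  induction l generalizing s with
  | nil => simp
  | cons x r ih =>
    simp only [List.foldl_cons, ih, List.mem_cons]
    by_cases h : p x = true
    · simp only [if_pos h, PySem.Set.mem_add]
      constructor
      · rintro (⟨h1|h1⟩|⟨e,he,hp,hz⟩)
        · exact .inl h1
        · exact .inr ⟨x, .inl rfl, h, h1⟩
        · exact .inr ⟨e, .inr he, hp, hz⟩
      · rintro (h1|⟨e,(rfl|he),hp,hz⟩)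
        · exact .inl (.inl h1)
        · exact .inl (.inr hz)
        · exact .inr ⟨e, he, hp, hz⟩
    · simp only [if_neg h]
      constructor
      · rintro (h1|⟨e,he,hp,hz⟩)
        · exact .inl h1
        · exact .inr ⟨e, .inr he, hp, hz⟩
      · rintro (h1|⟨e,(rfl|he),hp,hz⟩)
        · exact .inl h1
        · exact absurd hp h
        · exact .inr ⟨e, he, hp, hz⟩

theorem pvFoldlIsSome {f : Option Int → Int → Option Int}
    (hf : ∀ b x, (f (some b) x).isSome) :
    ∀ (l : List Int) (a : Int), (List.foldl f (some a) l).isSome := by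
  intro l
  induction l with
  | nil => intro a; rfl
  | cons b r ih =>
    intro a
    rw [List.foldl_cons]
    obtain ⟨c, hc⟩ := Option.isSome_iff_exists.mp (hf a b)
    rw [hc]; exact ih c

theorem pvMaxAux (l : List Int) (x : Int) :
    ∃ m, PySem.List.max? (x :: l) id = some m := by
  apply Option.isSome_iff_exists.mp
  simp only [PySem.List.max?, List.foldl_cons]
  exact pvFoldlIsSome (fun b x => by dsimp only; split <;> rfl) l x

theorem pvMaxEq (l1 l2 : List Int) (h : ∀ x, x ∈ l1 ↔ x ∈ l2) :
    (PySem.List.max? l1 id).getD 0 = (PySem.List.max? l2 id).getD 0 := by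
  match l1, l2 with
  | [], [] => rfl
  | [], y :: l2 => exact absurd ((h y).2 (.head _)) (by simp)
  | x :: l1, [] => exact absurd ((h x).1 (.head _)) (by simp)
  | x :: l1, y :: l2 =>
    obtain ⟨m1, h1⟩ := pvMaxAux l1 x
    obtain ⟨m2, h2⟩ := pvMaxAux l2 y
    rw [h1, h2]
    have hm1 := PySem.List.max?_mem h1
    have hm2 := PySem.List.max?_mem h2
    have le1 := PySem.List.max?_isMax h2 m1 ((h m1).1 hm1)
    have le2 := PySem.List.max?_isMax h1 m2 ((h m2).2 hm2)
    simp only [id_eq, Option.getD_some] at le1 le2 ⊢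
    omega

def pvG (S : Int) : List Int → Int
  | [] => 0
  | x :: r =>
    if (S - x) ∈ r then 1 + pvG S (r.erase (S - x)) else pvG S r
termination_by l => l.length
decreasing_by
  all_goals simp_all [List.length_erase_of_mem]

def pvFsum (S : Int) (V : List Int) (c : Int → Int) : Int :=
  (V.map (fun u =>
    if u < S - u then min (c u) (c (S - u))
    else if u = S - u then PySem.Int.floordiv (c u) 2
    else 0)).sum

-- sum over a Nodup list when the summand changes at exactly one point
theorem pvSumOne (V : List Int) (hnd : V.Nodup) (x : Int) (hx : x ∈ V)
    (t1 t2 : Int → Int) (hoff : ∀ u, u ≠ x → t1 u = t2 u) (hat : t1 x = t2 x + d) :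
    (V.map t1).sum = (V.map t2).sum + d := by
  induction V with
  | nil => cases hx
  | cons v r ih =>
    rcases List.mem_cons.mp hx with rfl | hxr
    · have hnx : ∀ u ∈ r, t1 u = t2 u := fun u hu =>
        hoff u (fun h => (List.nodup_cons.mp hnd).1 (h ▸ hu))
      simp only [List.map_cons, List.sum_cons, List.map_congr_left hnx, hat]
      ring
    · have hv : t1 v = t2 v := hoff v (fun h => (List.nodup_cons.mp hnd).1 (h ▸ hxr))
      simp only [List.map_cons, List.sum_cons, ih (List.nodup_cons.mp hnd).2 hxr, hv]
      ring

-- …at exactly two points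
theorem pvSumTwo (V : List Int) (hnd : V.Nodup) (x y : Int) (hx : x ∈ V) (hy : y ∈ V)
    (hxy : x ≠ y) (t1 t2 : Int → Int) (hoff : ∀ u, u ≠ x → u ≠ y → t1 u = t2 u)
    (hat : t1 x + t1 y = t2 x + t2 y + d) :
    (V.map t1).sum = (V.map t2).sum + d := by
  set t3 : Int → Int := fun u => if u = x then t1 x else t2 u with ht3
  have h1 : (V.map t1).sum = (V.map t3).sum + (t1 y - t2 y) := by
    apply pvSumOne V hnd y hy
    · intro u huy
      by_cases hux : u = x
      · subst hux; simp [ht3]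
      · simp [ht3, hux, hoff u hux huy]
    · simp [ht3, (Ne.symm hxy : y ≠ x)]
  have h2 : (V.map t3).sum = (V.map t2).sum + (t1 x - t2 x) := by
    apply pvSumOne V hnd x hx
    · intro u hux; simp [ht3, hux]
    · simp [ht3]
  rw [h1, h2]; omega

theorem pvG_eq_fsum (S : Int) (lst V : List Int) (hnd : V.Nodup)
    (hsub : ∀ x ∈ lst, x ∈ V) :
    pvG S lst = pvFsum S V (fun u => (lst.count u : Int)) := by
  have hfd : ∀ a : Int, PySem.Int.floordiv a 2 = a / 2 :=
    fun a => PySem.Int.floordiv_eq_ediv_of_pos (by norm_num)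
  induction lst using pvG.induct S with
  | case1 =>
    simp only [pvG, pvFsum]
    have : ∀ u ∈ V, (if u < S - u then min ((List.count u []:Nat) : Int) ((List.count (S-u) []:Nat) : Int)
        else if u = S - u then PySem.Int.floordiv ((List.count u []:Nat) : Int) 2 else 0) = 0 := by
      intro u _; simp
    rw [List.map_congr_left this]
    simp
  | case2 x r hin ih =>
    have hxV : x ∈ V := hsub x (List.mem_cons_self)
    have hyV : S - x ∈ V := hsub _ (List.mem_cons_of_mem x hin)
    have hpos : 0 < r.count (S - x) := List.count_pos_iff.mpr hin
    have hcnt : ∀ u, ((x :: r).count u : Int) =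
        ((r.erase (S - x)).count u : Int) + ((if u = x then 1 else 0) +
          (if u = S - x then 1 else 0)) := by
      intro u
      rcases eq_or_ne u (S - x) with rfl | huy
      · simp only [List.count_cons, List.count_erase_self, beq_iff_eq]
        split_ifs <;> omega
      · simp only [List.count_cons, List.count_erase_of_ne huy, beq_iff_eq]
        split_ifs <;> omega
    have hsub' : ∀ z ∈ r.erase (S - x), z ∈ V :=
      fun z hz => hsub z (List.mem_cons_of_mem x (List.mem_of_mem_erase hz))
    rw [pvG, if_pos hin, ih hsub']
    have key : pvFsum S V (fun u => (((x :: r).count u : Nat) : Int)) =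
        pvFsum S V (fun u => (((r.erase (S - x)).count u : Nat) : Int)) + 1 := by
      unfold pvFsum
      rcases eq_or_ne x (S - x) with hxy | hxy
      · apply pvSumOne V hnd x hxV
        · intro u hux
          beta_reduce
          rw [hcnt u, hcnt (S - u)]
          simp only [hfd, min_def]
          split_ifs <;> omega
        · beta_reduce
          rw [hcnt x, hcnt (S - x)]
          simp only [hfd, min_def]
          split_ifs <;> omega
      · apply pvSumTwo V hnd x (S - x) hxV hyV hxy
        · intro u hux huy
          beta_reduce
          rw [hcnt u, hcnt (S - u)]
          simp only [hfd, min_def]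
          split_ifs <;> omega
        · beta_reduce
          rw [hcnt x, hcnt (S - x), hcnt (S - (S - x))]
          simp only [hfd, min_def]
          split_ifs <;> omega
    rw [key]
    omega
  | case3 x r hnin ih =>
    have hsub' : ∀ z ∈ r, z ∈ V := fun z hz => hsub z (List.mem_cons_of_mem x hz)
    rw [pvG, if_neg hnin, ih hsub']
    unfold pvFsum
    congr 1
    apply List.map_congr_left
    intro u hu
    have hc0y : ((r.count (S - x) : Nat) : Int) = 0 := by
      simp [List.count_eq_zero.mpr hnin]
    have hcnt : ∀ v, ((x :: r).count v : Int) =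
        ((r.count v : Nat) : Int) + (if v = x then 1 else 0) := by
      intro v
      simp only [List.count_cons, beq_iff_eq]
      split_ifs <;> omega
    by_cases hux : u = x
    · subst hux
      beta_reduce
      rw [hcnt u, hcnt (S - u)]
      rcases eq_or_ne u (S - u) with heq | hne
      · have h0 : ((r.count u : Nat) : Int) = 0 := by rw [heq]; exact hc0y
        simp only [hfd, min_def]
        split_ifs <;> omega
      · simp only [hfd, min_def]
        split_ifs <;> omega
    · by_cases huy : u = S - x
      · subst huy
        beta_reduce
        rw [hcnt (S - x), hcnt (S - (S - x))]
        simp only [hfd, min_def]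
        split_ifs <;> omega
      · beta_reduce
        rw [hcnt u, hcnt (S - u)]
        simp only [hfd, min_def]
        split_ifs <;> omega

def pvMask : List Int → List Bool → List Int
  | [], _ => []
  | _ :: _, [] => []
  | x :: r, b :: u => if b then pvMask r u else x :: pvMask r u

-- Nat-index twin of pvFindJ
def pvFindN (lst : List Int) (S : Int) (used : List Bool) (xi : Int) : List Nat → Option Nat
  | [] => none
  | j :: rest =>
    if used.getD j false then pvFindN lst S used xi rest
    else if xi + lst.getD j 0 = S then some j
    else pvFindN lst S used xi rest

def pvStepN (lst : List Int) (S : Int) (st : Int × List Bool) (i : Nat) : Int × List Bool :=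
  if st.2.getD i false then st
  else
    match pvFindN lst S st.2 (lst.getD i 0) (List.range' (i + 1) (lst.length - (i + 1))) with
    | none => st
    | some j => (st.1 + 1, (st.2.set i true).set j true)

theorem pvPyRangeNat (a b : Nat) :
    PySem.List.pyRange (a : Int) (b : Int) 1 = (List.range' a (b - a)).map (fun (k : Nat) => (k : Int)) := by
  unfold PySem.List.pyRange
  have h1 : ¬ ((1 : Int) = 0) := by norm_num
  by_cases h : a < b
  · have hlt : (a : Int) < (b : Int) := by exact_mod_cast h
    have hc : (((b : Int) - (a : Int) + 1 - 1) / 1).toNat = b - a := by omega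
    simp only [if_neg h1, if_pos (by norm_num : (0:Int) < 1), if_pos hlt, hc,
      List.range'_eq_map_range, List.map_map]
    apply List.map_congr_left
    intro k _
    simp only [Function.comp_apply]
    push_cast; ring
  · have hlt : ¬ ((a : Int) < (b : Int)) := by exact_mod_cast h
    have hb : b - a = 0 := by omega
    simp [hb]

theorem pvFindJ_map (lst : List Int) (S : Int) (used : List Bool) (xi : Int) (js : List Nat) :
    pvFindJ lst S used xi (js.map (fun (k : Nat) => (k : Int))) =
      (pvFindN lst S used xi js).map (fun (k : Nat) => (k : Int)) := by
  induction js with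
  | nil => rfl
  | cons j rest ih =>
    simp only [List.map_cons, pvFindJ, pvFindN, Int.toNat_natCast, PySem.List.pyGetD_natCast]
    split_ifs
    · exact ih
    · rfl
    · exact ih

theorem pvMask_drop_cons (lst : List Int) (used : List Bool) (k : Nat)
    (hk : k < lst.length) (hu : used.length = lst.length) :
    pvMask (lst.drop k) (used.drop k) =
      if used.getD k false then pvMask (lst.drop (k + 1)) (used.drop (k + 1))
      else lst.getD k 0 :: pvMask (lst.drop (k + 1)) (used.drop (k + 1)) := by
  have hk' : k < used.length := by omega
  rw [List.drop_eq_getElem_cons hk, List.drop_eq_getElem_cons hk',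
    List.getD_eq_getElem _ _ hk, List.getD_eq_getElem _ _ hk']
  rfl

theorem pvFindSpec (lst : List Int) (S xi : Int) :
    ∀ (m k : Nat) (used : List Bool), k + m = lst.length → used.length = lst.length →
    (pvFindN lst S used xi (List.range' k m) = none ∧
      (S - xi) ∉ pvMask (lst.drop k) (used.drop k)) ∨
    (∃ j : Nat, pvFindN lst S used xi (List.range' k m) = some j ∧ k ≤ j ∧ j < lst.length ∧
      pvMask (lst.drop k) ((used.set j true).drop k) =
        (pvMask (lst.drop k) (used.drop k)).erase (S - xi) ∧
      (S - xi) ∈ pvMask (lst.drop k) (used.drop k)) := by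
  intro m
  induction m with
  | zero =>
    intro k used hkm hu
    left
    have hk : k = lst.length := by omega
    subst hk
    rw [List.drop_length, show lst.length = used.length from hu.symm, List.drop_length]
    exact ⟨rfl, by simp [pvMask]⟩
  | succ m ih =>
    intro k used hkm hu
    have hk : k < lst.length := by omega
    have hmask := pvMask_drop_cons lst used k hk hu
    rw [List.range'_succ]
    by_cases hb : used.getD k false
    · -- used[k]: the scan skips k, the mask does not see k
      rw [if_pos hb] at hmask
      rcases ih (k + 1) used (by omega) hu with ⟨hnone, hmem⟩ | ⟨j, hsome, hjk, hjl, hmaskj, hmem⟩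
      · left
        refine ⟨?_, by rw [hmask]; exact hmem⟩
        simp only [pvFindN]; rw [if_pos hb]; exact hnone
      · right
        refine ⟨j, ?_, by omega, hjl, ?_, by rw [hmask]; exact hmem⟩
        · simp only [pvFindN]; rw [if_pos hb]; exact hsome
        · have hmask' := pvMask_drop_cons lst (used.set j true) k hk (by simp [hu])
          have hgj : (used.set j true).getD k false = used.getD k false := by
            rw [List.getD_eq_getElem _ _ (by rw [List.length_set]; omega),
              List.getD_eq_getElem _ _ (by omega : k < used.length)]
            rw [List.getElem_set_ne (by omega)]
          rw [hmask', hgj, if_pos hb, hmask]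
          exact hmaskj
    · rw [if_neg hb] at hmask
      by_cases hhit : xi + lst.getD k 0 = S
      · -- found at k
        right
        refine ⟨k, ?_, le_refl k, hk, ?_, ?_⟩
        · simp only [pvFindN]; rw [if_neg hb, if_pos hhit]
        · have hmask' := pvMask_drop_cons lst (used.set k true) k hk (by simp [hu])
          have hgk : (used.set k true).getD k false = true := by
            have hk2 : k < (used.set k true).length := by rw [List.length_set]; omega
            rw [List.getD_eq_getElem _ _ hk2, List.getElem_set_self hk2]
          have hds : (used.set k true).drop (k + 1) = used.drop (k + 1) := by
            rw [List.drop_set, if_pos (by omega)]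
          rw [hmask', hgk, if_pos rfl, hds, hmask]
          have : S - xi = lst.getD k 0 := by omega
          rw [this, List.erase_cons_head]
        · rw [hmask]
          have : S - xi = lst.getD k 0 := by omega
          rw [this]; exact List.mem_cons_self
      · -- k unused but not matching: scan and mask both keep looking
        have hne : S - xi ≠ lst.getD k 0 := by omega
        rcases ih (k + 1) used (by omega) hu with ⟨hnone, hmem⟩ | ⟨j, hsome, hjk, hjl, hmaskj, hmem⟩
        · left
          refine ⟨?_, ?_⟩
          · simp only [pvFindN]; rw [if_neg hb, if_neg hhit]; exact hnone
          · rw [hmask]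
            intro hc
            rcases List.mem_cons.mp hc with h | h
            · exact hne h
            · exact hmem h
        · right
          refine ⟨j, ?_, by omega, hjl, ?_, ?_⟩
          · simp only [pvFindN]; rw [if_neg hb, if_neg hhit]; exact hsome
          · have hmask' := pvMask_drop_cons lst (used.set j true) k hk (by simp [hu])
            have hgj : (used.set j true).getD k false = used.getD k false := by
              rw [List.getD_eq_getElem _ _ (by rw [List.length_set]; omega),
                List.getD_eq_getElem _ _ (by omega : k < used.length)]
              rw [List.getElem_set_ne (by omega)]
            rw [hmask', hgj, if_neg hb, hmask, hmaskj]
            rw [List.erase_cons_tail (by simp only [beq_iff_eq]; exact fun h => hne h.symm)]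
          · rw [hmask]
            exact List.mem_cons_of_mem _ hmem

theorem pvInv (lst : List Int) (S : Int) :
    ∀ (n k : Nat) (c : Int) (used : List Bool), k + n = lst.length →
      used.length = lst.length →
      ((List.range' k n).foldl (pvStepN lst S) (c, used)).1 =
        c + pvG S (pvMask (lst.drop k) (used.drop k)) := by
  intro n
  induction n with
  | zero =>
    intro k c used hkn hu
    have hk : k = lst.length := by omega
    subst hk
    rw [List.drop_length, show lst.length = used.length from hu.symm, List.drop_length]
    simp [pvMask, pvG]
  | succ n ih =>
    intro k c used hkn hu
    have hk : k < lst.length := by omega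
    have hmask := pvMask_drop_cons lst used k hk hu
    rw [List.range'_succ, List.foldl_cons]
    by_cases hb : used.getD k false
    · rw [if_pos hb] at hmask
      have hstep : pvStepN lst S (c, used) k = (c, used) := by
        simp only [pvStepN]; rw [if_pos hb]
      rw [hstep, ih (k + 1) c used (by omega) hu, hmask]
    · rw [if_neg hb] at hmask
      rcases pvFindSpec lst S (lst.getD k 0) (lst.length - (k + 1)) (k + 1) used (by omega) hu with
        ⟨hnone, hmem⟩ | ⟨j, hsome, hjk, hjl, hmaskj, hmem⟩
      · have hstep : pvStepN lst S (c, used) k = (c, used) := by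
          simp only [pvStepN]; rw [if_neg hb, hnone]
        rw [hstep, ih (k + 1) c used (by omega) hu, hmask, pvG, if_neg hmem]
      · have hstep : pvStepN lst S (c, used) k =
            (c + 1, (used.set k true).set j true) := by
          simp only [pvStepN]; rw [if_neg hb, hsome]
        rw [hstep, ih (k + 1) (c + 1) ((used.set k true).set j true) (by omega) (by simp [hu]),
          hmask, pvG, if_pos hmem]
        have hds : ((used.set k true).set j true).drop (k + 1) = (used.set j true).drop (k + 1) := by
          rw [List.drop_set, List.drop_set, List.drop_set]
          split_ifs <;> first | rfl | omega
        rw [hds, hmaskj]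
        omega

theorem pvMask_replicate (l : List Int) : pvMask l (List.replicate l.length false) = l := by
  induction l with
  | nil => rfl
  | cons x r ih => simp [pvMask, List.replicate, ih]

theorem pvGreedy_eq_pvG (lst : List Int) (S : Int) : pvGreedy lst S = pvG S lst := by
  unfold pvGreedy
  have hr : PySem.List.pyRange 0 (lst.length : Int) 1 =
      (List.range' 0 lst.length).map (fun (k : Nat) => (k : Int)) := by
    have h := pvPyRangeNat 0 lst.length
    rw [Nat.sub_zero] at h
    exact_mod_cast h
  rw [hr, List.foldl_map]
  have hfun : (fun (st : Int × List Bool) (k : Nat) =>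
      if st.2.getD ((k : Int)).toNat false then st
      else
        match pvFindJ lst S st.2 (PySem.List.pyGetD lst (k : Int) 0)
            (PySem.List.pyRange ((k : Int) + 1) (lst.length : Int) 1) with
        | none => st
        | some j => (st.1 + 1, (st.2.set ((k : Int)).toNat true).set j.toNat true)) =
      pvStepN lst S := by
    funext st k
    have hcast : ((k : Int) + 1) = ((k + 1 : Nat) : Int) := by push_cast; ring
    rw [hcast, pvPyRangeNat (k + 1) lst.length, pvFindJ_map]
    unfold pvStepN
    simp only [Int.toNat_natCast, PySem.List.pyGetD_natCast]
    cases pvFindN lst S st.2 (lst.getD k 0) (List.range' (k + 1) (lst.length - (k + 1))) with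
    | none => simp only [Option.map_none]
    | some j => simp only [Option.map_some, Int.toNat_natCast]
  rw [hfun, pvInv lst S lst.length 0 0 (List.replicate lst.length false) (by omega) (by simp),
    List.drop_zero, List.drop_zero, pvMask_replicate]
  omega

theorem pvCountTwo (l : List Int) (a : Int) (h : 2 ≤ l.count a) :
    ∃ i j : Nat, i < j ∧ j < l.length ∧ l.getD i 0 = a ∧ l.getD j 0 = a := by
  induction l with
  | nil => simp [List.count] at h
  | cons x r ih =>
    by_cases hax : a = x
    · subst hax
      have h1 : 1 ≤ r.count a := by
        simp only [List.count_cons, beq_iff_eq] at h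
        split_ifs at h <;> omega
      have hmem : a ∈ r := List.count_pos_iff.mp (by omega)
      obtain ⟨j, hj, hje⟩ := List.mem_iff_getElem.mp hmem
      refine ⟨0, j + 1, by omega, by simp only [List.length_cons]; omega, by simp, ?_⟩
      rw [List.getD_cons_succ, List.getD_eq_getElem _ _ hj]; exact hje
    · have h1 : 2 ≤ r.count a := by
        simp only [List.count_cons, beq_iff_eq] at h
        split_ifs at h <;> omega
      obtain ⟨i, j, hij, hjl, hi, hj⟩ := ih h1
      exact ⟨i + 1, j + 1, by omega, by simp only [List.length_cons]; omega,
        by rwa [List.getD_cons_succ], by rwa [List.getD_cons_succ]⟩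

theorem pvTwoCount (l : List Int) : ∀ i j : Nat, i < j → j < l.length →
    l.getD i 0 = l.getD j 0 → 2 ≤ l.count (l.getD i 0) := by
  induction l with
  | nil => intro i j _ h; simp at h
  | cons x r ih =>
    intro i j hij hjl heq
    obtain ⟨j', rfl⟩ : ∃ j', j = j' + 1 := ⟨j - 1, by omega⟩
    have hjl' : j' < r.length := by simp only [List.length_cons] at hjl; omega
    cases i with
    | zero =>
      simp only [List.getD_cons_zero, List.getD_cons_succ] at heq ⊢
      have hxr : x ∈ r := by
        rw [heq, List.getD_eq_getElem _ _ hjl']; exact List.getElem_mem _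
      have hc := List.count_pos_iff.mpr hxr
      simp only [List.count_cons, beq_iff_eq]
      split_ifs <;> omega
    | succ i' =>
      simp only [List.getD_cons_succ] at heq ⊢
      have h2 := ih i' j' (by omega) hjl' heq
      simp only [List.count_cons, beq_iff_eq]
      split_ifs <;> omega

theorem pvMemIdx (l : List Int) (a : Int) (h : a ∈ l) :
    ∃ i : Nat, i < l.length ∧ l.getD i 0 = a := by
  obtain ⟨i, hi, hie⟩ := List.mem_iff_getElem.mp h
  exact ⟨i, hi, by rw [List.getD_eq_getElem _ _ hi]; exact hie⟩

theorem pvKeys_outer (lst : List Int) (L : List Int) (d : PySem.Dict Int Int) :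
    (L.foldl (fun d i =>
      (PySem.List.pyRange (i + 1) (lst.length : Int) 1).foldl (fun d j =>
        d.modify (PySem.List.pyGetD lst i 0 + PySem.List.pyGetD lst j 0) 0 (· + 1)) d) d).keys
    = PySem.Set.update d.keys (L.flatMap (fun i =>
        (PySem.List.pyRange (i + 1) (lst.length : Int) 1).map (fun j =>
          PySem.List.pyGetD lst i 0 + PySem.List.pyGetD lst j 0))) := by
  induction L generalizing d with
  | nil => simp [PySem.Set.update_nil]
  | cons i L ih =>
    rw [List.foldl_cons, ih, PySem.Dict.keys_foldl_modify_key, List.flatMap_cons,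
      PySem.Set.update_append]

theorem pvKeysA_mem (lst : List Int) (z : Int) :
    z ∈ (pvSumCounts lst).keys ↔ pvValChar lst z := by
  unfold pvSumCounts
  rw [pvKeys_outer]
  rw [show (PySem.Dict.empty : PySem.Dict Int Int).keys = [] from rfl]
  rw [PySem.Set.mem_update]
  simp only [List.mem_nil_iff, false_or, List.mem_flatMap, List.mem_map]
  constructor
  · rintro ⟨i, hi, j, hj, rfl⟩
    rw [PySem.List.mem_pyRange_one] at hi hj
    have h0i : 0 ≤ i := hi.1
    have h0j : 0 ≤ j := by omega
    rw [PySem.List.pyGetD_of_nonneg _ _ h0i, PySem.List.pyGetD_of_nonneg _ _ h0j]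
    have hiN : i.toNat < lst.length := by omega
    have hjN : j.toNat < lst.length := by omega
    have hij : i.toNat < j.toNat := by omega
    refine ⟨lst.getD i.toNat 0, lst.getD j.toNat 0, ?_, ?_, ?_, rfl⟩
    · rw [List.getD_eq_getElem _ _ hiN]; exact List.getElem_mem _
    · rw [List.getD_eq_getElem _ _ hjN]; exact List.getElem_mem _
    · intro he
      exact pvTwoCount lst i.toNat j.toNat hij hjN he
  · rintro ⟨a, b, ha, hb, hcnt, rfl⟩
    by_cases hab : a = b
    · subst hab
      obtain ⟨i, j, hij, hjl, hi, hj⟩ := pvCountTwo lst a (hcnt rfl)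
      refine ⟨(i : Int), ?_, (j : Int), ?_, ?_⟩
      · rw [PySem.List.mem_pyRange_one]; omega
      · rw [PySem.List.mem_pyRange_one]; constructor <;> [omega; exact_mod_cast hjl]
      · rw [PySem.List.pyGetD_of_nonneg _ _ (by omega), PySem.List.pyGetD_of_nonneg _ _ (by omega),
          Int.toNat_natCast, Int.toNat_natCast, hi, hj]
    · obtain ⟨i, hil, hi⟩ := pvMemIdx lst a ha
      obtain ⟨j, hjl, hj⟩ := pvMemIdx lst b hb
      have hij : i ≠ j := fun h => hab (by rw [← hi, ← hj, h])
      rcases Nat.lt_or_ge i j with hlt | hge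
      · refine ⟨(i : Int), ?_, (j : Int), ?_, ?_⟩
        · rw [PySem.List.mem_pyRange_one]; constructor <;> [omega; exact_mod_cast hil]
        · rw [PySem.List.mem_pyRange_one]; constructor <;> [omega; exact_mod_cast hjl]
        · rw [PySem.List.pyGetD_of_nonneg _ _ (by omega), PySem.List.pyGetD_of_nonneg _ _ (by omega),
            Int.toNat_natCast, Int.toNat_natCast, hi, hj]
      · have hlt : j < i := by omega
        refine ⟨(j : Int), ?_, (i : Int), ?_, ?_⟩
        · rw [PySem.List.mem_pyRange_one]; constructor <;> [omega; exact_mod_cast hjl]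
        · rw [PySem.List.mem_pyRange_one]; constructor <;> [omega; exact_mod_cast hil]
        · rw [PySem.List.pyGetD_of_nonneg _ _ (by omega), PySem.List.pyGetD_of_nonneg _ _ (by omega),
            Int.toNat_natCast, Int.toNat_natCast, hi, hj]
          ring

theorem pvMem_outer (vals : List Int) (cnt : PySem.Dict Int Int) (z : Int) :
    ∀ (L : List Int) (s0 : PySem.Set Int),
    z ∈ L.foldl (fun s v =>
        vals.foldl (fun s w =>
          if v != w || cnt.getD v 0 > 1 then PySem.Set.add s (v + w) else s) s) s0 ↔
      z ∈ s0 ∨ ∃ v ∈ L, ∃ w ∈ vals, (v ≠ w ∨ 1 < cnt.getD v 0) ∧ z = v + w := by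
  intro L
  induction L with
  | nil => simp
  | cons v L ih =>
    intro s0
    rw [List.foldl_cons, ih, pvMem_foldl_addIf]
    constructor
    · rintro (⟨h | ⟨w, hw, hp, rfl⟩⟩ | ⟨v', hv', w, hw, hc, rfl⟩)
      · exact .inl h
      · refine .inr ⟨v, List.mem_cons_self, w, hw, ?_, rfl⟩
        rcases Bool.or_eq_true_iff.mp hp with h | h
        · exact .inl (bne_iff_ne.mp h)
        · exact .inr (by exact_mod_cast of_decide_eq_true h)
      · exact .inr ⟨v', List.mem_cons_of_mem _ hv', w, hw, hc, rfl⟩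
    · rintro (h | ⟨v', hv', w, hw, hc, rfl⟩)
      · exact .inl (.inl h)
      · rcases List.mem_cons.mp hv' with rfl | hv'
        · refine .inl (.inr ⟨w, hw, ?_, rfl⟩)
          rcases hc with h | h
          · exact Bool.or_eq_true_iff.mpr (.inl (bne_iff_ne.mpr h))
          · exact Bool.or_eq_true_iff.mpr (.inr (decide_eq_true h))
        · exact .inr ⟨v', hv', w, hw, hc, rfl⟩

theorem pvSumsB_mem (lst : List Int) (z : Int) :
    z ∈ (PySem.Dict.counter lst).keys.foldl (fun s v =>
        (PySem.Dict.counter lst).keys.foldl (fun s w =>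
          if v != w || (PySem.Dict.counter lst).getD v 0 > 1 then PySem.Set.add s (v + w) else s) s)
      PySem.Set.empty ↔ pvValChar lst z := by
  rw [pvMem_outer]
  have hmem : ∀ u : Int, u ∈ (PySem.Dict.counter lst).keys ↔ u ∈ lst := by
    intro u
    rw [PySem.Dict.keys_counter, PySem.Set.mem_ofList]
  constructor
  · rintro (h | ⟨v, hv, w, hw, hc, rfl⟩)
    · simp [PySem.Set.empty] at h
    · refine ⟨v, w, (hmem v).mp hv, (hmem w).mp hw, ?_, rfl⟩
      intro hvw
      rcases hc with h | h
      · exact absurd hvw h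
      · rw [PySem.Dict.getD_counter] at h
        exact_mod_cast h
  · rintro ⟨a, b, ha, hb, hcnt, rfl⟩
    refine .inr ⟨a, (hmem a).mpr ha, b, (hmem b).mpr hb, ?_, rfl⟩
    by_cases hab : a = b
    · refine .inr ?_
      rw [PySem.Dict.getD_counter]
      exact_mod_cast hcnt hab
    · exact .inl hab

theorem pvFG (lst : List Int) (S : Int) :
    ((PySem.Dict.counter lst).keys.map (fun u => pvTerm (PySem.Dict.counter lst) S u)).sum
      = pvFsum S (PySem.Dict.counter lst).keys (fun u => (lst.count u : Int)) := by
  unfold pvFsum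
  apply congrArg List.sum
  apply List.map_congr_left
  intro u _
  simp only [pvTerm, PySem.Dict.getD_counter]

theorem pvMain (lst : List Int) : find_max_pair_count lst = find_max_pair_count_alt lst := by
  unfold find_max_pair_count find_max_pair_count_alt
  dsimp only
  rw [PySem.List.foldl_append_singleton_eq_map, List.nil_append]
  apply pvMaxEq
  intro x
  have hG : ∀ S : Int, pvGreedy lst S =
      ((PySem.Dict.counter lst).keys.map (fun u => pvTerm (PySem.Dict.counter lst) S u)).sum := by
    intro S
    rw [pvGreedy_eq_pvG, pvFG,
      pvG_eq_fsum S lst _ (PySem.Dict.nodup_keys_counter lst)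
        (fun y hy => by rw [PySem.Dict.keys_counter, PySem.Set.mem_ofList]; exact hy)]
  simp only [List.mem_map]
  constructor
  · rintro ⟨S, hS, rfl⟩
    exact ⟨S, (pvSumsB_mem lst S).mpr ((pvKeysA_mem lst S).mp hS), (hG S).symm⟩
  · rintro ⟨S, hS, rfl⟩
    exact ⟨S, (pvKeysA_mem lst S).mpr ((pvSumsB_mem lst S).mp hS), hG S⟩

-- ===== VERDICT (by name: the statement is the Claim_ definition above) =====
theorem find_max_pair_count_spec : Claim_equal_find_max_pair_count := by
  intro lst _ _
  unfold Spec_find_max_pair_count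
  exact pvMain lst
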